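-- pv_equiv track=rewrite | github.com/geeklicantropo/Weather-Forecast-and-Analysis-JOJO- | Scripts/data_concatenation.py | group_by_period
-- ===== SOURCE A (Python) =====
-- def group_by_period(year_groups: dict, period: int, min_year: int, max_year: int) -> dict:
--     """Group files by specified period (5 or 10 years), adjusting end year if it exceeds max_year."""
--     period_groups = {}
--     # Ajusta o ano inicial para ser múltiplo do período
--     period_start = (min_year // period) * period
--     while period_start <= max_year:
--         period_end = period_start + (period - 1)
--         if period_end > max_year:
--             period_end = max_year
--         key = (period_start, period_end)
--         period_groups[key] = []
--         period_start += period
--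
--     # Associa os arquivos aos períodos correspondentes
--     for year, files in year_groups.items():
--         for (start_year, end_year) in period_groups.keys():
--             if start_year <= year <= end_year:
--                 period_groups[(start_year, end_year)].extend(files)
--                 break
--     return period_groups
-- ===== SOURCE B (Python) =====
-- def group_by_period(year_groups: dict, period: int, min_year: int, max_year: int) -> dict:
--     """Group files by period via arithmetic bucket indexing, one pass over the years."""
--     first = (min_year // period) * period
--     n = ((max_year - first) // period) + 1 if first <= max_year else 0
--     buckets = [[] for _ in range(n)]
--     for year, files in year_groups.items():
--         idx = (year - first) // period
--         if 0 <= idx < n and year <= max_year: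
--             buckets[idx].extend(files)
--     return {(first + i * period, min(first + (i + 1) * period - 1, max_year)): buckets[i]
--             for i in range(n)}
-- ===== Notes on version B (the rewrite author's own statement) =====
-- stated objective: alternative
-- what changed: Instead of scanning the bucket list for every year, B computes each year's bucket index directly as (year - first_start) // period and appends into an indexed bucket array in one pass; same cost on inputs with few buckets.
import Mathlib
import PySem

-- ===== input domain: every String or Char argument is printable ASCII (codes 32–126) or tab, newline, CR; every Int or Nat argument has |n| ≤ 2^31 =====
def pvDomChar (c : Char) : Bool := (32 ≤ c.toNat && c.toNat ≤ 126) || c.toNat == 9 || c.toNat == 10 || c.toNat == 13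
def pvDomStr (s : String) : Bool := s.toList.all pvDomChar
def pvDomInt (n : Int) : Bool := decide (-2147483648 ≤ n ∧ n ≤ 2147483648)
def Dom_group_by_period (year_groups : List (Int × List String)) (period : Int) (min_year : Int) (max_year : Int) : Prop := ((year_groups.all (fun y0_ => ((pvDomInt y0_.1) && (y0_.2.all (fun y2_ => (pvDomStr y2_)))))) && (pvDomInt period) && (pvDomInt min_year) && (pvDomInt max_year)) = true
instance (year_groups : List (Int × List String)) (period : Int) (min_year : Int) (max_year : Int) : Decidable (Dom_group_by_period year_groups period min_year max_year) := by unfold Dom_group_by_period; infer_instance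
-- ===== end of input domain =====

-- B replaces A's per-year linear scan of the bucket list by direct arithmetic bucket
-- indexing ((year - first) // period) in one pass over the years (alternative algorithm).

-- ===== PORT A =====
-- the while loop building the empty buckets; fuel is a totalization guard only
def pvMkBuckets (period max_year : Int) : Nat → Int → List (Int × Int)
  | 0, _ => []
  | fuel + 1, period_start =>
    if period_start ≤ max_year then
      let pe := period_start + (period - 1)
      let pe := if pe > max_year then max_year else pe
      (period_start, pe) :: pvMkBuckets period max_year fuel (period_start + period)
    else []

-- the inner 'for (start_year, end_year) in period_groups.keys(): if … break' scan
def pvFindKey : List ((Int × Int) × List String) → Int → Option (Int × Int)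
  | [], _ => none
  | (k, _) :: rest, y => if k.1 ≤ y ∧ y ≤ k.2 then some k else pvFindKey rest y

-- the body of A's 'for year, files in year_groups.items()' loop
def pvStepA (pg : List ((Int × Int) × List String)) (yf : Int × List String) : List ((Int × Int) × List String) :=
  match pvFindKey pg yf.1 with
  | some k => pg.map (fun kv => if kv.1 = k then (kv.1, kv.2 ++ yf.2) else kv)
  | none => pg

def group_by_period (year_groups : List (Int × List String)) (period : Int) (min_year : Int) (max_year : Int) : List (Int × Int × List String) :=
  let first := PySem.Int.floordiv min_year period * period
  let keys := pvMkBuckets period max_year ((max_year - first).toNat + 1) first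
  let pg0 : List ((Int × Int) × List String) := keys.map (fun k => (k, []))
  let pg := year_groups.foldl pvStepA pg0
  pg.map (fun kv => (kv.1.1, kv.1.2, kv.2))

-- ===== PORT B =====
def group_by_period_alt (year_groups : List (Int × List String)) (period : Int) (min_year : Int) (max_year : Int) : List (Int × Int × List String) :=
  let first := PySem.Int.floordiv min_year period * period
  let n : Int := if first ≤ max_year then PySem.Int.floordiv (max_year - first) period + 1 else 0
  let buckets : List (List String) := List.replicate n.toNat []
  let buckets := year_groups.foldl (fun bs yf =>
      let idx := PySem.Int.floordiv (yf.1 - first) period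
      if 0 ≤ idx ∧ idx < n ∧ yf.1 ≤ max_year then
        bs.set idx.toNat (bs.getD idx.toNat [] ++ yf.2)
      else bs) buckets
  (List.range n.toNat).map (fun (i : Nat) =>
    (first + (i : Int) * period, min (first + ((i : Int) + 1) * period - 1) max_year, buckets.getD i []))

-- ===== PRECONDITION & SPEC =====
-- Pre_ excludes exactly the inputs where A never returns: period = 0 (ZeroDivisionError)
-- and negative periods whose first bucket start is ≤ max_year (A's while loop never
-- terminates); negative periods with an empty bucket range, where A returns {}, are kept.
def Pre_group_by_period (year_groups : List (Int × List String)) (period : Int) (min_year : Int) (max_year : Int) : Prop :=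
  1 ≤ period ∨ (period ≤ -1 ∧ max_year < PySem.Int.floordiv min_year period * period)
instance (year_groups : List (Int × List String)) (period : Int) (min_year : Int) (max_year : Int) : Decidable (Pre_group_by_period year_groups period min_year max_year) := by unfold Pre_group_by_period; infer_instance

def pvWitness_group_by_period : (List (Int × List String)) × Int × Int × Int :=
  ([(1998, ["a.csv"]), (2004, ["b.csv", "c.csv"]), (2012, ["d.csv"])], 5, 1998, 2007)

def Spec_group_by_period (year_groups : List (Int × List String)) (period : Int) (min_year : Int) (max_year : Int) (out : List (Int × Int × List String)) : Prop := out = group_by_period_alt year_groups period min_year max_year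
instance (year_groups : List (Int × List String)) (period : Int) (min_year : Int) (max_year : Int) (out : List (Int × Int × List String)) : Decidable (Spec_group_by_period year_groups period min_year max_year out) := by unfold Spec_group_by_period; infer_instance

-- ===== CLAIM (what is proved, stated in full; the proofs are below) =====
def Claim_equal_group_by_period : Prop := ∀ (year_groups : List (Int × List String)) (period : Int) (min_year : Int) (max_year : Int), Dom_group_by_period year_groups period min_year max_year → Pre_group_by_period year_groups period min_year max_year → Spec_group_by_period year_groups period min_year max_year (group_by_period year_groups period min_year max_year)

-- ===== LEMMAS AND PROOFS =====

-- the key of bucket i, counting from the first start F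
def pvKeyOf (p my F : Int) (i : Nat) : Int × Int := (F + i * p, min (F + i * p + p - 1) my)

-- the number of buckets A's while loop generates from start s
def pvCnt (p my s : Int) : Nat := if s ≤ my then (PySem.Int.floordiv (my - s) p + 1).toNat else 0

theorem pvCnt_step (p my s : Int) (hp : 1 ≤ p) (hs : s ≤ my) :
    pvCnt p my s = pvCnt p my (s + p) + 1 := by
  unfold pvCnt
  rw [if_pos hs, PySem.Int.floordiv_eq_ediv_of_pos (by omega)]
  by_cases h2 : s + p ≤ my
  · rw [if_pos h2, PySem.Int.floordiv_eq_ediv_of_pos (by omega)]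
    have h4 : my - s = (my - (s + p)) + 1 * p := by ring
    rw [h4, Int.add_mul_ediv_right _ _ (by omega : p ≠ 0)]
    have h3 : 0 ≤ (my - (s + p)) / p := Int.ediv_nonneg (by omega) (by omega)
    omega
  · rw [if_neg h2]
    have h5 : (my - s) / p = 0 := Int.ediv_eq_zero_of_lt (by omega) (by omega)
    omega

theorem pvMkBuckets_eq (p my : Int) (hp : 1 ≤ p) :
    ∀ (fuel : Nat) (s : Int), my - s < fuel →
      pvMkBuckets p my fuel s = (List.range (pvCnt p my s)).map (fun i => pvKeyOf p my s i) := by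
  intro fuel
  induction fuel with
  | zero =>
    intro s h
    have hs : ¬ s ≤ my := by exact_mod_cast by omega
    simp [pvMkBuckets, pvCnt, hs]
  | succ n ih =>
    intro s h
    by_cases hs : s ≤ my
    · rw [pvCnt_step p my s hp hs, List.range_succ_eq_map, List.map_cons, List.map_map]
      simp only [pvMkBuckets, if_pos hs]
      congr 1
      · unfold pvKeyOf
        simp only [Prod.mk.injEq]
        refine ⟨by simp, ?_⟩
        split_ifs <;> simp <;> omega
      · rw [ih (s + p) (by push_cast at h ⊢; omega)]
        apply List.map_congr_left
        intro i _
        unfold pvKeyOf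
        have h1 : s + ((i : Int) + 1) * p = (s + p) + (i : Int) * p := by ring
        simp only [Function.comp, Nat.succ_eq_add_one]
        push_cast
        rw [h1]
    · unfold pvMkBuckets pvCnt
      rw [if_neg hs, if_neg hs]
      simp

theorem pvHit_iff (p my F : Int) (hp : 1 ≤ p) (y : Int) (i : Nat) :
    ((pvKeyOf p my F i).1 ≤ y ∧ y ≤ (pvKeyOf p my F i).2) ↔
      (PySem.Int.floordiv (y - F) p = (i : Int) ∧ y ≤ my) := by
  unfold pvKeyOf
  simp only [le_min_iff]
  rw [PySem.Int.floordiv_eq_iff_of_pos (by omega)]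
  have hA : ((i : Int) + 1) * p = (i : Int) * p + p := by ring
  constructor
  · rintro ⟨h1, h2, h3⟩
    exact ⟨⟨by linarith, by linarith⟩, h3⟩
  · rintro ⟨⟨h1, h2⟩, h3⟩
    exact ⟨by linarith, by linarith, h3⟩

theorem pvFindKey_eq (p my F : Int) (hp : 1 ≤ p) (b : Nat → List String) (y : Int)
    (l : List Nat) :
    pvFindKey (l.map (fun i => (pvKeyOf p my F i, b i))) y =
      (if 0 ≤ PySem.Int.floordiv (y - F) p ∧ y ≤ my ∧ (PySem.Int.floordiv (y - F) p).toNat ∈ l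
       then some (pvKeyOf p my F (PySem.Int.floordiv (y - F) p).toNat) else none) := by
  induction l with
  | nil => simp [pvFindKey]
  | cons i rest ih =>
    simp only [List.map_cons, pvFindKey, ih]
    by_cases hhit : (pvKeyOf p my F i).1 ≤ y ∧ y ≤ (pvKeyOf p my F i).2
    · obtain ⟨he, hmy⟩ := (pvHit_iff p my F hp y i).mp hhit
      rw [if_pos hhit, if_pos ⟨by omega, hmy, by rw [he]; simp⟩]
      congr 1
      congr 1
      omega
    · rw [if_neg hhit]
      by_cases hc : 0 ≤ PySem.Int.floordiv (y - F) p ∧ y ≤ my ∧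
          (PySem.Int.floordiv (y - F) p).toNat ∈ rest
      · rw [if_pos hc, if_pos ⟨hc.1, hc.2.1, List.mem_cons_of_mem _ hc.2.2⟩]
      · rw [if_neg hc]
        rw [if_neg ?_]
        rintro ⟨h1, h2, h3⟩
        rcases List.mem_cons.mp h3 with h4 | h4
        · apply hhit
          apply (pvHit_iff p my F hp y i).mpr
          exact ⟨by omega, h2⟩
        · exact hc ⟨h1, h2, h4⟩

theorem pvStepA_some (pg : List ((Int × Int) × List String)) (yf : Int × List String)
    (k : Int × Int) (h : pvFindKey pg yf.1 = some k) :
    pvStepA pg yf = pg.map (fun kv => if kv.1 = k then (kv.1, kv.2 ++ yf.2) else kv) := by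
  unfold pvStepA; rw [h]

theorem pvStepA_none (pg : List ((Int × Int) × List String)) (yf : Int × List String)
    (h : pvFindKey pg yf.1 = none) : pvStepA pg yf = pg := by
  unfold pvStepA; rw [h]

theorem pvGetD_set (bs : List (List String)) (j : Nat) (v : List String) (hj : j < bs.length) (i : Nat) :
    (bs.set j v).getD i [] = if i = j then v else bs.getD i [] := by
  rw [List.getD_eq_getElem?_getD, List.getD_eq_getElem?_getD, List.getElem?_set]
  split_ifs with h1 h2 h2
  · subst h1; rfl
  · omega
  · omega
  · rfl

theorem pvGetD_replicate (n i : Nat) :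
    (List.replicate n ([] : List String)).getD i [] = [] := by
  rw [List.getD_eq_getElem?_getD, List.getElem?_replicate]
  split_ifs <;> rfl

theorem pvUpdate_eq (p my F : Int) (hp : 1 ≤ p) (b : Nat → List String) (fs : List String)
    (j : Nat) (N : Nat) :
    ((List.range N).map (fun i => (pvKeyOf p my F i, b i))).map
        (fun kv => if kv.1 = pvKeyOf p my F j then (kv.1, kv.2 ++ fs) else kv)
      = (List.range N).map (fun i => (pvKeyOf p my F i, if i = j then b i ++ fs else b i)) := by
  rw [List.map_map]
  apply List.map_congr_left
  intro i _
  simp only [Function.comp]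
  by_cases h : i = j
  · subst h; simp
  · have hk : pvKeyOf p my F i ≠ pvKeyOf p my F j := by
      intro hc
      apply h
      have h1 : F + (i : Int) * p = F + (j : Int) * p := congrArg Prod.fst hc
      have h2 := mul_right_cancel₀ (by omega : p ≠ 0) (by omega : (i : Int) * p = (j : Int) * p)
      exact_mod_cast h2
    simp [hk, h]

theorem pvFold_invariant (p my F : Int) (hp : 1 ≤ p) (N : Nat) (nInt : Int)
    (hn : nInt.toNat = N) (hn0 : 0 ≤ nInt) :
    ∀ (ygs : List (Int × List String)) (bs : List (List String)), bs.length = N →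
      (ygs.foldl pvStepA
        ((List.range N).map (fun i => (pvKeyOf p my F i, bs.getD i []))))
      = (List.range N).map (fun i => (pvKeyOf p my F i,
          (ygs.foldl (fun bs yf =>
            let idx := PySem.Int.floordiv (yf.1 - F) p
            if 0 ≤ idx ∧ idx < nInt ∧ yf.1 ≤ my then
              bs.set idx.toNat (bs.getD idx.toNat [] ++ yf.2)
            else bs) bs).getD i [])) := by
  intro ygs
  induction ygs with
  | nil => intro bs hbs; simp
  | cons yf rest ih =>
    intro bs hbs
    simp only [List.foldl_cons]
    have hfk := pvFindKey_eq p my F hp (fun i => bs.getD i []) yf.1 (List.range N)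
    by_cases hc : 0 ≤ PySem.Int.floordiv (yf.1 - F) p ∧
        PySem.Int.floordiv (yf.1 - F) p < nInt ∧ yf.1 ≤ my
    · have hmem : (PySem.Int.floordiv (yf.1 - F) p).toNat ∈ List.range N := by
        rw [List.mem_range]; omega
      rw [if_pos ⟨hc.1, hc.2.2, hmem⟩] at hfk
      rw [pvStepA_some _ _ _ hfk, if_pos hc]
      set j := (PySem.Int.floordiv (yf.1 - F) p).toNat with hj
      have hjN : j < N := List.mem_range.mp hmem
      rw [pvUpdate_eq p my F hp _ yf.2 j N]
      have hset : ∀ i ∈ List.range N,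
          (pvKeyOf p my F i, if i = j then bs.getD i [] ++ yf.2 else bs.getD i [])
            = (pvKeyOf p my F i, (bs.set j (bs.getD j [] ++ yf.2)).getD i []) := by
        intro i _
        rw [pvGetD_set bs j _ (by omega) i]
        by_cases h : i = j
        · subst h; rfl
        · simp [h]
      rw [List.map_congr_left hset]
      rw [ih (bs.set j (bs.getD j [] ++ yf.2)) (by simp [hbs])]
    · have hcond : ¬ (0 ≤ PySem.Int.floordiv (yf.1 - F) p ∧ yf.1 ≤ my ∧
          (PySem.Int.floordiv (yf.1 - F) p).toNat ∈ List.range N) := by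
        intro ⟨h1, h2, h3⟩
        rw [List.mem_range] at h3
        exact hc ⟨h1, by omega, h2⟩
      rw [if_neg hcond] at hfk
      rw [pvStepA_none _ _ hfk, if_neg hc]
      exact ih bs hbs

theorem pvFoldEmpty (ygs : List (Int × List String)) :
    ygs.foldl pvStepA [] = [] := by
  induction ygs with
  | nil => rfl
  | cons h t ih => simpa [pvStepA, pvFindKey] using ih

-- ===== VERDICT (by name: the statement is the Claim_ definition above) =====
theorem group_by_period_spec : Claim_equal_group_by_period := by
  intro ygs p mn my _ hpre
  show group_by_period ygs p mn my = group_by_period_alt ygs p mn my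
  rcases hpre with hp | ⟨hp, hF⟩
  · simp only [group_by_period, group_by_period_alt]
    set F := PySem.Int.floordiv mn p * p with hFdef
    set nInt : Int := if F ≤ my then PySem.Int.floordiv (my - F) p + 1 else 0 with hndef
    have hn0 : 0 ≤ nInt := by
      rw [hndef]; split_ifs with h
      · have h1 : 0 ≤ PySem.Int.floordiv (my - F) p := by
          rw [PySem.Int.floordiv_eq_ediv_of_pos (by omega)]
          exact Int.ediv_nonneg (by omega) (by omega)
        omega
      · omega
    have hcnt : pvCnt p my F = nInt.toNat := by
      unfold pvCnt; rw [hndef]; split_ifs <;> rfl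
    rw [pvMkBuckets_eq p my hp _ F (by push_cast; omega), hcnt, List.map_map]
    have hinit : ((fun k => (k, ([] : List String))) ∘ fun i => pvKeyOf p my F i)
        = fun i => (pvKeyOf p my F i, (List.replicate nInt.toNat ([] : List String)).getD i []) := by
      funext i; rw [pvGetD_replicate]; rfl
    rw [hinit,
      pvFold_invariant p my F hp nInt.toNat nInt rfl hn0 ygs _ (by simp),
      List.map_map]
    apply List.map_congr_left
    intro i _
    simp only [Function.comp, pvKeyOf]
    have h2 : F + ((i : Int) + 1) * p - 1 = F + (i : Int) * p + p - 1 := by ring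
    rw [h2]
  · simp only [group_by_period, group_by_period_alt]
    have h1 : (my - PySem.Int.floordiv mn p * p).toNat = 0 := by omega
    have h2 : ¬ PySem.Int.floordiv mn p * p ≤ my := by omega
    rw [h1]
    simp [pvMkBuckets, h2, pvFoldEmpty]
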